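-- pv_equiv track=rewrite | github.com/shivanirao1710/Resume-Parser | app.py | find_next_section
-- ===== SOURCE A (Python) =====
-- def find_next_section(text, start_index):
--     section_headers = ["experience", "education", "projects", "skills", "certifications", "achievements"]
--     next_index = len(text)
--     for header in section_headers:
--         header_index = text.lower().find(header, start_index + 1)
--         if header_index != -1 and header_index < next_index:
--             next_index = header_index
--     return next_index
-- ===== SOURCE B (Python) =====
-- def find_next_section(text, start_index):
--     section_headers = ("experience", "education", "projects", "skills", "certifications", "achievements")
--     low = text.lower()
--     for i in range(max(start_index + 1, 0), len(text)):
--         if low.startswith(section_headers, i):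
--             return i
--     return len(text)
-- ===== Notes on version B (the rewrite author's own statement) =====
-- stated objective: alternative
-- what changed: Instead of six separate substring-find scans (one per header) whose results are minimised, B lowercases once and does a single left-to-right scan from max(start_index+1, 0), returning the first position where any of the six headers starts.
-- intended difference: For start_index < -1 on texts that contain a section header before position len(text)+start_index+1, A's str.find wraps the negative start and searches only the tail of the text (returning a later index or len(text), here 12), while B scans from the beginning and returns that first header position (here 0); B's value is intended because the next section after a pre-text position is the first header in the text. — e.g. on find_next_section("skills and x", -10): A returns 12, B returns 0
import Mathlib
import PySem

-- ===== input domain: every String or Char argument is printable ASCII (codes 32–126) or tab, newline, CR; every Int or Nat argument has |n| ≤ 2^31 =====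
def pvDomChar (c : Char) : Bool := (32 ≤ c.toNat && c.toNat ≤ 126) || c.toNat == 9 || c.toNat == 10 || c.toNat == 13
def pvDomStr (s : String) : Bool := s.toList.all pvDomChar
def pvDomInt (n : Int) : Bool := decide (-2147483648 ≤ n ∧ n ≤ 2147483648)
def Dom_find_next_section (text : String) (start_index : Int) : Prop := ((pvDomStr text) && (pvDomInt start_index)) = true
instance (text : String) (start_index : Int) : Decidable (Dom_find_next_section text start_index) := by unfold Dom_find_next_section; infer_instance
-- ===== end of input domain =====

-- B replaces A's six separate find-scans (one per header, taking a running min) by a single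
-- left-to-right scan from max(start_index+1, 0) returning the first position where any header
-- starts (objective: alternative); on D_ (negative start wrapped by str.find) B intentionally
-- searches from the beginning instead.


-- ===== PORT A =====
def fnsHeaders : List String :=
  ["experience", "education", "projects", "skills", "certifications", "achievements"]

def find_next_section (text : String) (start_index : Int) : Int :=
  fnsHeaders.foldl
    (fun next_index header =>
      let header_index := PySem.Str.findFrom (PySem.Str.lower text) header (start_index + 1) none
      if header_index ≠ -1 ∧ header_index < next_index then header_index else next_index)
    (PySem.Str.len text)

-- ===== PORT B =====
def fnsAltHeaders : List (List Char) :=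
  ["experience".toList, "education".toList, "projects".toList,
   "skills".toList, "certifications".toList, "achievements".toList]

-- the `for i in range(start, len(text))` loop of Source B with its early return
def fnsAltScan (low : List Char) (n i : Nat) : Int :=
  if i < n then
    if fnsAltHeaders.any (fun hd => hd.isPrefixOf (low.drop i)) then (i : Int)
    else fnsAltScan low n (i + 1)
  else (n : Int)
termination_by n - i

def find_next_section_alt (text : String) (start_index : Int) : Int :=
  let low := PySem.Chars.lower text.toList
  let n := text.toList.length
  fnsAltScan low n (max (start_index + 1) 0).toNat

-- ===== PRECONDITION & SPEC =====
-- For start_index < -1 on texts containing a header before position len(text)+start_index+1,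
-- A's str.find wraps the negative start and searches only the tail (a later index or len(text)),
-- while B scans from the beginning and returns that first header position — the intended value,
-- since the next section after a pre-text position is the first header in the text.
def D_find_next_section (text : String) (start_index : Int) : Prop :=
  start_index + 1 < 0 ∧
  ∃ j ∈ List.range text.toList.length,
    (j : Int) < (text.toList.length : Int) + (start_index + 1) ∧
    ∃ h ∈ (["experience", "education", "projects", "skills", "certifications", "achievements"] : List String),
      h.toList <+: (PySem.Chars.lower text.toList).drop j
instance (text : String) (start_index : Int) : Decidable (D_find_next_section text start_index) := by
  unfold D_find_next_section; infer_instance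

def Spec_find_next_section (text : String) (start_index : Int) (out : Int) : Prop :=
  ¬ D_find_next_section text start_index → out = find_next_section_alt text start_index
instance (text : String) (start_index : Int) (out : Int) : Decidable (Spec_find_next_section text start_index out) := by
  unfold Spec_find_next_section; infer_instance

def pvDiffWitness_find_next_section : String × Int := ("skills and x", -10)
def pvDiffWitnessOut_find_next_section : Int × Int := (12, 0)

-- ===== CLAIM (what is proved, stated in full; the proofs are below) =====
def Claim_unchanged_find_next_section : Prop := ∀ (text : String) (start_index : Int), Dom_find_next_section text start_index → Spec_find_next_section text start_index (find_next_section text start_index)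
def Claim_changed_find_next_section : Prop := Dom_find_next_section (pvDiffWitness_find_next_section.1) (pvDiffWitness_find_next_section.2) ∧ D_find_next_section (pvDiffWitness_find_next_section.1) (pvDiffWitness_find_next_section.2) ∧ find_next_section (pvDiffWitness_find_next_section.1) (pvDiffWitness_find_next_section.2) = pvDiffWitnessOut_find_next_section.1 ∧ find_next_section_alt (pvDiffWitness_find_next_section.1) (pvDiffWitness_find_next_section.2) = pvDiffWitnessOut_find_next_section.2 ∧ pvDiffWitnessOut_find_next_section.1 ≠ pvDiffWitnessOut_find_next_section.2
def Claim_exact_find_next_section : Prop := ∀ (text : String) (start_index : Int), Dom_find_next_section text start_index → D_find_next_section text start_index → find_next_section text start_index ≠ find_next_section_alt text start_index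

-- ===== LEMMAS AND PROOFS =====

-- the normalised start position findFrom works with (Python's slice-bound rule)
def fnsSt (s1 n : Int) : Int := if s1 < 0 then (if s1 + n < 0 then 0 else s1 + n) else s1

-- A's effective start as a Nat
def fnsKA (s1 : Int) (n : Nat) : Nat :=
  if s1 < 0 then (max 0 ((n : Int) + s1)).toNat else s1.toNat

theorem findFrom_closed (l hd : List Char) (s1 : Int) :
    PySem.Chars.findFrom l hd s1 none =
      (if (l.length : Int) < fnsSt s1 l.length then -1
       else if PySem.Chars.find (l.drop (fnsSt s1 l.length).toNat) hd = -1 then -1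
       else fnsSt s1 l.length + PySem.Chars.find (l.drop (fnsSt s1 l.length).toNat) hd) := by
  unfold PySem.Chars.findFrom fnsSt
  simp

theorem fnsSt_eq (s1 : Int) (n : Nat) : fnsSt s1 n = ((fnsKA s1 n : Nat) : Int) := by
  unfold fnsSt fnsKA
  split_ifs <;> omega

-- findFrom with any start equals findFrom with A's normalised Nat start
theorem findFrom_norm (l hd : List Char) (s1 : Int) :
    PySem.Chars.findFrom l hd s1 none =
    PySem.Chars.findFrom l hd ((fnsKA s1 l.length : Nat) : Int) none := by
  rw [findFrom_closed, findFrom_closed, fnsSt_eq]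
  have h : fnsSt ((fnsKA s1 l.length : Nat) : Int) l.length = ((fnsKA s1 l.length : Nat) : Int) := by
    unfold fnsSt; split <;> omega
  rw [h]

-- findFrom is -1 when the (normalised) start is beyond the end
theorem findFrom_of_gt (l hd : List Char) (k : Nat) (h : l.length < k) :
    PySem.Chars.findFrom l hd (k : Int) none = -1 := by
  rw [findFrom_closed]
  have h1 : fnsSt (k : Int) l.length = (k : Int) := by unfold fnsSt; split <;> omega
  rw [h1, if_pos (by exact_mod_cast h)]

theorem fnsHeaders_toList_ne_nil : ∀ h ∈ fnsHeaders, h.toList ≠ [] := by decide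

theorem fnsAltHeaders_eq : fnsAltHeaders = fnsHeaders.map String.toList := by decide

theorem len_lower (l : List Char) : (PySem.Chars.lower l).length = l.length := by
  simp [PySem.Chars.lower]

-- a prefix at position j ≥ k is an infix of the drop at k
theorem prefix_drop_infix (hd l : List Char) (k j : Nat) (hk : k ≤ j)
    (h : hd <+: l.drop j) : hd <:+: l.drop k := by
  have heq : l.drop j = (l.drop k).drop (j - k) := by
    rw [List.drop_drop]; congr 1; omega
  rw [heq] at h
  exact h.isInfix.trans (List.drop_suffix _ _).isInfix

-- a nonempty prefix of a drop forces the drop position below the length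
theorem lt_length_of_prefix_drop (hd l : List Char) (m : Nat)
    (hp : hd <+: l.drop m) (hne : hd ≠ []) : m < l.length := by
  have h1 : hd.length ≤ (l.drop m).length := hp.length_le
  have h2 : 0 < hd.length := List.length_pos_iff.mpr hne
  simp only [List.length_drop] at h1
  omega

-- B's scan returns n when no header starts anywhere in [i, n)
theorem scan_none (low : List Char) (n : Nat) :
    ∀ i, (∀ j, i ≤ j → j < n →
      ¬ (fnsAltHeaders.any (fun hd => hd.isPrefixOf (low.drop j)) = true)) →
    fnsAltScan low n i = (n : Int) := by
  intro i h
  induction hn : n - i generalizing i with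
  | zero =>
    unfold fnsAltScan
    have hge : ¬ i < n := by omega
    simp [hge]
  | succ m ih =>
    unfold fnsAltScan
    by_cases hi : i < n
    · have hno := h i le_rfl hi
      simp only [hi, if_true, hno]
      exact ih (i + 1) (fun j hj1 hj2 => h j (by omega) hj2) (by omega)
    · simp [hi]

-- B's scan returns the first position m ∈ [i, n) where a header starts
theorem scan_first (low : List Char) (n : Nat) :
    ∀ i m, i ≤ m → m < n →
      (fnsAltHeaders.any (fun hd => hd.isPrefixOf (low.drop m)) = true) →
      (∀ j, i ≤ j → j < m →
        ¬ (fnsAltHeaders.any (fun hd => hd.isPrefixOf (low.drop j)) = true)) →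
    fnsAltScan low n i = (m : Int) := by
  intro i m him hmn hm h
  induction hn : m - i generalizing i with
  | zero =>
    have : i = m := by omega
    subst this
    unfold fnsAltScan
    simp [hmn, hm]
  | succ d ih =>
    unfold fnsAltScan
    have hi : i < n := by omega
    have hno := h i le_rfl (by omega)
    simp only [hi, if_true, hno]
    exact ih (i + 1) (by omega) (fun j hj1 hj2 => h j (by omega) hj2) (by omega)

-- B's scan skips over a match-free interval
theorem scan_skip (low : List Char) (n : Nat) :
    ∀ i k, i ≤ k →
      (∀ j, i ≤ j → j < k →
        ¬ (fnsAltHeaders.any (fun hd => hd.isPrefixOf (low.drop j)) = true)) →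
    fnsAltScan low n i = fnsAltScan low n k := by
  intro i k hik h
  induction hn : k - i generalizing i with
  | zero =>
    have : i = k := by omega
    rw [this]
  | succ d ih =>
    have hik' : i < k := by omega
    by_cases hi : i < n
    · have hno := h i le_rfl hik'
      conv_lhs => unfold fnsAltScan
      simp only [hi, if_true, hno]
      exact ih (i + 1) (by omega) (fun j hj1 hj2 => h j (by omega) hj2) (by omega)
    · rw [scan_none low n i (fun j _ hj2 => absurd hj2 (by omega)),
          scan_none low n k (fun j _ hj2 => absurd hj2 (by omega))]

-- B's scan never returns a position below its start
theorem scan_ge (low : List Char) (n : Nat) :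
    ∀ i, i ≤ n → (i : Int) ≤ fnsAltScan low n i := by
  intro i hi
  induction hn : n - i generalizing i with
  | zero =>
    unfold fnsAltScan
    have hge : ¬ i < n := by omega
    simp only [hge, if_false]
    omega
  | succ m ih =>
    unfold fnsAltScan
    by_cases hlt : i < n
    · simp only [hlt, if_true]
      split
      · omega
      · have := ih (i + 1) (by omega) (by omega)
        omega
    · simp only [hlt, if_false]; omega

-- B's scan result is at most any matching position in range
theorem scan_le_of_match (low : List Char) (n : Nat) :
    ∀ i j, i ≤ j → j < n →
      (fnsAltHeaders.any (fun hd => hd.isPrefixOf (low.drop j)) = true) →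
    fnsAltScan low n i ≤ (j : Int) := by
  intro i j hij hjn hm
  induction hn : j - i generalizing i with
  | zero =>
    have : i = j := by omega
    subst this
    unfold fnsAltScan
    simp [hjn, hm]
  | succ d ih =>
    unfold fnsAltScan
    have hi : i < n := by omega
    simp only [hi, if_true]
    split
    · omega
    · exact ih (i + 1) (by omega) (by omega)

-- A's fold: the result is the accumulator or one of the successful finds
theorem fold_mem {α : Type} (f : α → Int) :
    ∀ (hs : List α) (acc : Int),
      (hs.foldl (fun a hd => if f hd ≠ -1 ∧ f hd < a then f hd else a) acc = acc ∨
       ∃ hd ∈ hs, hs.foldl (fun a hd => if f hd ≠ -1 ∧ f hd < a then f hd else a) acc = f hd ∧ f hd ≠ -1) := by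
  intro hs
  induction hs with
  | nil => intro acc; left; rfl
  | cons hd t ih =>
    intro acc
    simp only [List.foldl_cons]
    by_cases hc : f hd ≠ -1 ∧ f hd < acc
    · rw [if_pos hc]
      rcases ih (f hd) with h | ⟨hd', hmem, heq, hne⟩
      · right; exact ⟨hd, List.mem_cons_self, h, hc.1⟩
      · right; exact ⟨hd', List.mem_cons_of_mem _ hmem, heq, hne⟩
    · rw [if_neg hc]
      rcases ih acc with h | ⟨hd', hmem, heq, hne⟩
      · left; exact h
      · right; exact ⟨hd', List.mem_cons_of_mem _ hmem, heq, hne⟩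

-- A's fold: the result is ≤ the accumulator and ≤ every successful find
theorem fold_le {α : Type} (f : α → Int) :
    ∀ (hs : List α) (acc : Int),
      (hs.foldl (fun a hd => if f hd ≠ -1 ∧ f hd < a then f hd else a) acc ≤ acc ∧
       ∀ hd ∈ hs, f hd ≠ -1 →
         hs.foldl (fun a hd => if f hd ≠ -1 ∧ f hd < a then f hd else a) acc ≤ f hd) := by
  intro hs
  induction hs with
  | nil => intro acc; exact ⟨le_rfl, by simp⟩
  | cons hd t ih =>
    intro acc
    simp only [List.foldl_cons]
    by_cases hc : f hd ≠ -1 ∧ f hd < acc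
    · rw [if_pos hc]
      obtain ⟨h1, h2⟩ := ih (f hd)
      refine ⟨le_trans h1 (le_of_lt hc.2), ?_⟩
      intro hd' hmem hne
      rcases List.mem_cons.mp hmem with h | h
      · exact h ▸ h1
      · exact h2 hd' h hne
    · rw [if_neg hc]
      obtain ⟨h1, h2⟩ := ih acc
      refine ⟨h1, ?_⟩
      intro hd' hmem hne
      rcases List.mem_cons.mp hmem with h | h
      · have hnl : ¬ f hd' < acc := fun hlt => hc (h ▸ ⟨h ▸ hne, h ▸ hlt⟩)
        exact le_trans h1 (not_lt.mp hnl)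
      · exact h2 hd' h hne

-- the membership tested by B's scan, expressed through A's header list
theorem any_iff (cs : List Char) (j : Nat) :
    (fnsAltHeaders.any (fun hd => hd.isPrefixOf (cs.drop j)) = true) ↔
    ∃ h ∈ fnsHeaders, h.toList <+: cs.drop j := by
  rw [fnsAltHeaders_eq]
  simp only [List.any_eq_true, List.mem_map]
  constructor
  · rintro ⟨hd, ⟨h, hh, rfl⟩, hp⟩
    exact ⟨h, hh, List.isPrefixOf_iff_prefix.mp hp⟩
  · rintro ⟨h, hh, hp⟩
    exact ⟨h.toList, ⟨h, hh, rfl⟩, List.isPrefixOf_iff_prefix.mpr hp⟩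

-- A equals B's scan started at A's effective (wrapped) start position
theorem A_eq_scan (text : String) (start_index : Int) :
    find_next_section text start_index =
      fnsAltScan (PySem.Chars.lower text.toList) text.toList.length
        (fnsKA (start_index + 1) text.toList.length) := by
  unfold find_next_section
  set cs := PySem.Chars.lower text.toList with hcs
  set n := text.toList.length with hn
  have hlen : cs.length = n := len_lower _
  set k : Nat := fnsKA (start_index + 1) n with hk
  set f : String → Int := fun h => PySem.Chars.findFrom cs h.toList (k : Int) none with hf
  have hfun : (fun (next_index : Int) (header : String) =>
      let header_index := PySem.Str.findFrom (PySem.Str.lower text) header (start_index + 1) none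
      if header_index ≠ -1 ∧ header_index < next_index then header_index else next_index)
      = (fun a hd => if f hd ≠ -1 ∧ f hd < a then f hd else a) := by
    funext a hd
    have : PySem.Str.findFrom (PySem.Str.lower text) hd (start_index + 1) none = f hd := by
      rw [PySem.Str.findFrom_eq, PySem.Str.toList_lower, ← hcs, findFrom_norm, hlen, ← hk]
    simp only [this]
  rw [hfun, PySem.Str.len_eq, ← hn]
  set r := fnsHeaders.foldl (fun a hd => if f hd ≠ -1 ∧ f hd < a then f hd else a) (n : Int) with hr
  by_cases hkn : n < k
  · have hall : ∀ h ∈ fnsHeaders, f h = -1 := fun h _ => findFrom_of_gt cs h.toList k (hlen ▸ hkn)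
    have : r = (n : Int) := by
      rcases fold_mem f fnsHeaders (n : Int) with h | ⟨hd, hmem, _, hne⟩
      · exact h
      · exact absurd (hall hd hmem) hne
    rw [this]
    unfold fnsAltScan
    have : ¬ k < n := by omega
    simp [this]
  · have hkn' : k ≤ cs.length := by omega
    by_cases hex : ∃ h ∈ fnsHeaders, f h ≠ -1
    · obtain ⟨h0, hh0, hne0⟩ := hex
      have hfeq : ∀ h : String, PySem.Chars.findFrom cs h.toList (k : Int) none = f h :=
        fun _ => rfl
      obtain ⟨hk0, hp0, _⟩ := PySem.Chars.findFrom_natCast_spec cs h0.toList k hkn' hne0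
      rw [hfeq] at hk0 hp0
      have hm0 : (f h0).toNat < n :=
        hlen ▸ lt_length_of_prefix_drop _ _ _ hp0 (fnsHeaders_toList_ne_nil h0 hh0)
      obtain ⟨hle_acc, hle_f⟩ := fold_le f fnsHeaders (n : Int)
      have hr_le : r ≤ f h0 := hle_f h0 hh0 hne0
      have hr_ne_acc : r ≠ (n : Int) := by
        intro h; rw [h] at hr_le; omega
      rcases fold_mem f fnsHeaders (n : Int) with h | ⟨h1, hh1, heq1, hne1⟩
      · exact absurd h hr_ne_acc
      obtain ⟨hk1, hp1, hmin1⟩ := PySem.Chars.findFrom_natCast_spec cs h1.toList k hkn' hne1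
      rw [hfeq] at hk1 hp1
      set m := (f h1).toNat with hm
      have hrm : r = (m : Int) := by rw [hr, heq1]; omega
      have hmn : m < n :=
        hlen ▸ lt_length_of_prefix_drop _ _ _ hp1 (fnsHeaders_toList_ne_nil h1 hh1)
      have hkm : k ≤ m := by omega
      rw [hrm, scan_first cs n k m hkm hmn ((any_iff cs m).mpr ⟨h1, hh1, hp1⟩) ?_]
      intro j hj1 hj2 hany
      obtain ⟨h2, hh2, hp2⟩ := (any_iff cs j).mp hany
      have hinf : h2.toList <:+: cs.drop k := prefix_drop_infix _ _ _ _ hj1 hp2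
      have hne2 : f h2 ≠ -1 := by
        intro hcon
        exact ((PySem.Chars.findFrom_natCast_eq_neg_one_iff cs h2.toList k hkn').mp hcon) hinf
      obtain ⟨hk2, _, hmin2⟩ := PySem.Chars.findFrom_natCast_spec cs h2.toList k hkn' hne2
      rw [hfeq] at hk2
      have hjlt : j < (f h2).toNat := by
        have := hle_f h2 hh2 hne2
        omega
      exact hmin2 j hj1 hjlt hp2
    · push Not at hex
      have : r = (n : Int) := by
        rcases fold_mem f fnsHeaders (n : Int) with h | ⟨hd, hmem, _, hne⟩
        · exact h
        · exact absurd (hex hd hmem) hne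
      rw [this, scan_none cs n k ?_]
      intro j hj1 hj2 hany
      obtain ⟨h2, hh2, hp2⟩ := (any_iff cs j).mp hany
      exact ((PySem.Chars.findFrom_natCast_eq_neg_one_iff cs h2.toList k hkn').mp (hex h2 hh2))
        (prefix_drop_infix _ _ _ _ hj1 hp2)

-- D_ unfolded to a usable form
theorem D_iff (text : String) (start_index : Int) :
    D_find_next_section text start_index ↔
      (start_index + 1 < 0 ∧ ∃ j : Nat, j < text.toList.length ∧
        (j : Int) < (text.toList.length : Int) + (start_index + 1) ∧
        (fnsAltHeaders.any (fun hd => hd.isPrefixOf ((PySem.Chars.lower text.toList).drop j)) = true)) := by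
  unfold D_find_next_section
  constructor
  · rintro ⟨h1, j, hj, hb, hex⟩
    exact ⟨h1, j, List.mem_range.mp hj, hb, (any_iff _ j).mpr hex⟩
  · rintro ⟨h1, j, hjn, hjb, hm⟩
    exact ⟨h1, j, List.mem_range.mpr hjn, hjb, (any_iff _ j).mp hm⟩

theorem main_unchanged (text : String) (start_index : Int)
    (hnd : ¬ D_find_next_section text start_index) :
    find_next_section text start_index = find_next_section_alt text start_index := by
  rw [A_eq_scan]
  unfold find_next_section_alt
  set cs := PySem.Chars.lower text.toList with hcs
  set n := text.toList.length with hn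
  set s1 := start_index + 1 with hs1
  by_cases hneg : s1 < 0
  · have hkB : (max s1 0).toNat = 0 := by omega
    rw [hkB]
    have hkA : fnsKA s1 n = (max 0 ((n : Int) + s1)).toNat := by unfold fnsKA; split_ifs <;> omega
    rw [hkA]
    symm
    apply scan_skip
    · omega
    · intro j _ hjk hany
      apply hnd
      rw [D_iff]
      refine ⟨hneg, j, ?_, ?_, hany⟩ <;> omega
  · have : fnsKA s1 n = (max s1 0).toNat := by unfold fnsKA; split_ifs <;> omega
    rw [this]

theorem main_tight (text : String) (start_index : Int)
    (hd : D_find_next_section text start_index) :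
    find_next_section text start_index ≠ find_next_section_alt text start_index := by
  rw [A_eq_scan]
  unfold find_next_section_alt
  set cs := PySem.Chars.lower text.toList with hcs
  set n := text.toList.length with hn
  set s1 := start_index + 1 with hs1
  obtain ⟨hneg, j, hjn, hjb, hm⟩ := (D_iff text start_index).mp hd
  have hkB : (max s1 0).toNat = 0 := by omega
  have hkA : fnsKA s1 n = ((n : Int) + s1).toNat := by unfold fnsKA; split_ifs <;> omega
  rw [hkB, hkA]
  have hA_ge : ((((n : Int) + s1).toNat : Nat) : Int) ≤ fnsAltScan cs n ((n : Int) + s1).toNat :=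
    scan_ge cs n _ (by omega)
  have hB_le : fnsAltScan cs n 0 ≤ (j : Int) := scan_le_of_match cs n 0 j (by omega) hjn hm
  intro hcon
  have hchain : ((((n : Int) + s1).toNat : Nat) : Int) ≤ (j : Int) :=
    le_trans (le_of_le_of_eq hA_ge hcon) hB_le
  omega

-- ===== VERDICT (by name: the statements are the Claim_ definitions above) =====
theorem find_next_section_spec : Claim_unchanged_find_next_section := by
  intro text start_index _
  unfold Spec_find_next_section
  exact fun hnd => main_unchanged text start_index hnd

theorem find_next_section_changed : Claim_changed_find_next_section := by
  unfold Claim_changed_find_next_section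
  refine ⟨by decide, by decide, by decide, ?_, by decide⟩
  show find_next_section_alt "skills and x" (-10) = (0 : Int)
  unfold find_next_section_alt
  have h0 : (max ((-10 : Int) + 1) 0).toNat = 0 := by decide
  rw [h0]
  exact scan_first _ _ 0 0 le_rfl (by decide) (by decide) (fun j h1 h2 => absurd h2 (by omega))

theorem find_next_section_tight : Claim_exact_find_next_section := by
  intro text start_index _ hd
  exact main_tight text start_index hd
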